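-- pv_equiv track=rewrite | github.com/KlarenceNicolasCatalan/Python_Practices | Python_FileHandling.py | twentyCalc
-- ===== SOURCE A (Python) =====
-- def twentyCalc(_set):
--
--     listLessThan20 = []
--     greaterThan20 = 0
--     for x in range(len(_set)):
--         if _set[x] < 20:
--             listLessThan20.append(_set[x])
--
--     for x in range(len(_set)):
--         if _set[x] > 20:
--             greaterThan20 += 1
--
--     return listLessThan20, greaterThan20
-- ===== SOURCE B (Python) =====
-- def twentyCalc(_set):
--     listLessThan20 = [v for v in _set if v < 20]
--     greaterThan20 = len(_set) - len(listLessThan20) - _set.count(20)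
--     return listLessThan20, greaterThan20
-- ===== Notes on version B (the rewrite author's own statement) =====
-- stated objective: alternative
-- what changed: B builds the <20 list by a filter comprehension and derives the >20 count arithmetically as len(_set) - len(less) - _set.count(20), eliminating A's counting loop entirely.
import Mathlib
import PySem

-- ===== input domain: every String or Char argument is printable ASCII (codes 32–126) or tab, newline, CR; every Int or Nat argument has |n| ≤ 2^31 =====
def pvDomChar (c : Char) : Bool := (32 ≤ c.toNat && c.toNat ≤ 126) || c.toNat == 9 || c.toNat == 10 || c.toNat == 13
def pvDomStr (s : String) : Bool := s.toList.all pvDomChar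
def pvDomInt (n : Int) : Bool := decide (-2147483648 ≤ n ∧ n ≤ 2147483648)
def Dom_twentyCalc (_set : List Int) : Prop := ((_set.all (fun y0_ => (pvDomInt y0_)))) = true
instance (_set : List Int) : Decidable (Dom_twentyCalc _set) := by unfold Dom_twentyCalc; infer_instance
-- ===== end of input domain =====

-- B filters the <20 elements and obtains the >20 count arithmetically (length minus the <20 count minus the
-- multiplicity of 20), replacing A's counting loop by a formula (alternative decomposition; same O(n) cost).
-- ===== PORT A =====
def twentyCalc (_set : List Int) : List Int × Int :=
  let listLessThan20 : List Int :=
    (PySem.List.pyRange 0 _set.length 1).foldl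
      (fun acc x => if PySem.List.pyGetD _set x 0 < 20 then acc ++ [PySem.List.pyGetD _set x 0] else acc) []
  let greaterThan20 : Int :=
    (PySem.List.pyRange 0 _set.length 1).foldl
      (fun acc x => if PySem.List.pyGetD _set x 0 > 20 then acc + 1 else acc) 0
  (listLessThan20, greaterThan20)

-- ===== PORT B =====
def twentyCalc_alt (_set : List Int) : List Int × Int :=
  let listLessThan20 := _set.filter (fun v => v < 20)
  (listLessThan20,
   (_set.length : Int) - (listLessThan20.length : Int) - (PySem.List.count _set 20 : Int))

-- ===== PRECONDITION & SPEC =====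
def Spec_twentyCalc (_set : List Int) (out : List Int × Int) : Prop := out = twentyCalc_alt _set
instance (_set : List Int) (out : List Int × Int) : Decidable (Spec_twentyCalc _set out) := by unfold Spec_twentyCalc; infer_instance

-- ===== CLAIM (what is proved, stated in full; the proofs are below) =====
def Claim_equal_twentyCalc : Prop := ∀ (_set : List Int), Dom_twentyCalc _set → Spec_twentyCalc _set (twentyCalc _set)

-- ===== LEMMAS AND PROOFS =====
-- any list splits into its <20, =20 and >20 parts, so countP (>20) = length - countP (<20) - count 20
theorem pv_count_split (l : List Int) :
    (l.countP (fun v => decide (v > 20)) : Int)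
      = (l.length : Int) - (l.countP (fun v => decide (v < 20)) : Int) - (l.count 20 : Int) := by
  induction l with
  | nil => simp
  | cons x t ih =>
    simp only [List.countP_cons, List.count_cons, List.length_cons]
    by_cases h1 : x < 20
    · have h2 : ¬ x > 20 := by omega
      have h3 : (x == 20) = false := by simp; omega
      simp [h1, h2, h3] at *; omega
    · by_cases h2 : x > 20
      · have h3 : (x == 20) = false := by simp; omega
        simp [h1, h2, h3] at *; omega
      · have h3 : (x == 20) = true := by simp; omega
        simp [h1, h2, h3] at *; omega

-- ===== VERDICT (by name: the statement is the Claim_ definition above) =====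
theorem twentyCalc_spec : Claim_equal_twentyCalc := by
  intro s _
  unfold Spec_twentyCalc twentyCalc twentyCalc_alt
  dsimp only
  rw [PySem.List.foldl_pyRange_zero_pyGetD' s 0 (fun acc v => if v < 20 then acc ++ [v] else acc) [],
      PySem.List.foldl_pyRange_zero_pyGetD' s 0 (fun n v => if v > 20 then n + 1 else n) 0,
      PySem.List.foldl_append_ite_eq_filter, PySem.List.foldl_ite_add_one]
  simp only [List.nil_append, PySem.List.count_eq, zero_add]
  exact congrArg _ (by rw [pv_count_split s]; simp [List.countP_eq_length_filter])
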